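-- pv_equiv track=rewrite | github.com/Kcruz24/AlgoExpert-Python | Easy/ClassPhotos/ClassPhotos.py | class_photos2
-- ===== SOURCE A (Python) =====
-- def class_photos2(red_shirt_heights, blue_shirt_heights):
--
-- 	if max(blue_shirt_heights) == max(red_shirt_heights):
-- 		return False
--
-- 	back_row = max(max(blue_shirt_heights), max(red_shirt_heights))
--
-- 	for i in range(len(blue_shirt_heights)):
-- 		tallest_blue_shirt = max(blue_shirt_heights)
-- 		tallest_red_shirt = max(red_shirt_heights)
--
-- 		if back_row in blue_shirt_heights and tallest_blue_shirt < tallest_red_shirt: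
-- 			blue_shirt_heights.pop(tallest_blue_shirt)
-- 			return False
-- 		elif back_row in red_shirt_heights and tallest_red_shirt < tallest_blue_shirt:
-- 			red_shirt_heights.pop(tallest_red_shirt)
-- 			return False
--
-- 	return True
-- ===== SOURCE B (Python) =====
-- def class_photos2(red_shirt_heights, blue_shirt_heights):
--     m_blue = max(blue_shirt_heights)
--     m_red = max(red_shirt_heights)
--     return m_blue != m_red
-- ===== Notes on version B (the rewrite author's own statement) =====
-- stated objective: simpler
-- what changed: A's loop is dead code (after the equality guard the overall max cannot live in the list with the strictly smaller max, so both early-return branches are unreachable and the loop always falls through to True); B drops the loop, membership tests and pop calls and just compares the two maxima.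
import Mathlib
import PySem

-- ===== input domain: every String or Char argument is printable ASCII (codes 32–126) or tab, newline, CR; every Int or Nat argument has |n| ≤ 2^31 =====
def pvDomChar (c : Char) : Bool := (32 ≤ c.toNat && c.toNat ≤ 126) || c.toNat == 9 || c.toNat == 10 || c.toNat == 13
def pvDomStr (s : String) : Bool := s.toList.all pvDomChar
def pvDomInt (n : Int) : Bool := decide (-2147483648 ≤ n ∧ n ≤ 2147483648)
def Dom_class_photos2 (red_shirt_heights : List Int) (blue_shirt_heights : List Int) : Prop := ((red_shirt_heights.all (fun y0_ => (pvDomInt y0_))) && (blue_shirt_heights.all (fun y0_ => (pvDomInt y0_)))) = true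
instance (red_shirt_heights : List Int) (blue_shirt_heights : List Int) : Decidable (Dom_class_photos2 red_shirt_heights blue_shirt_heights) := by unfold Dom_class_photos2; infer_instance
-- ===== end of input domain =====

-- B simply compares the two maxima: A's loop never fires (after the equality guard the
-- overall max cannot belong to the list with the strictly smaller max), so A always
-- falls through to True when the maxima differ. Objective: simpler.

-- ===== PORT A =====
-- Literal transliteration of A: guard, back_row, loop over range(len(blue)) recomputing
-- both maxima each iteration (the lists are never mutated before a return), membership
-- tests, early return encoded as Option state; the pop calls precede a `return False`
-- and cannot affect the returned value.
def class_photos2_step (red_shirt_heights : List Int) (blue_shirt_heights : List Int)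
    (back_row : Int) (st : Option Bool) (_ : Nat) : Option Bool :=
  match st with
  | some r => some r
  | none =>
    let tallest_blue := (PySem.List.max? blue_shirt_heights (fun y => y)).getD 0
    let tallest_red := (PySem.List.max? red_shirt_heights (fun y => y)).getD 0
    if blue_shirt_heights.contains back_row && decide (tallest_blue < tallest_red) then
      some false
    else if red_shirt_heights.contains back_row && decide (tallest_red < tallest_blue) then
      some false
    else none

def class_photos2 (red_shirt_heights : List Int) (blue_shirt_heights : List Int) : Bool :=
  match PySem.List.max? blue_shirt_heights (fun y => y), PySem.List.max? red_shirt_heights (fun y => y) with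
  | some mb, some mr =>
    if mb = mr then false
    else
      let back_row := max mb mr
      let loop := (List.range blue_shirt_heights.length).foldl
        (class_photos2_step red_shirt_heights blue_shirt_heights back_row) none
      loop.getD true
  | _, _ => false  -- unreachable under Pre_ (max of an empty list raises in Python)

-- ===== PORT B =====
def class_photos2_alt (red_shirt_heights : List Int) (blue_shirt_heights : List Int) : Bool :=
  match PySem.List.max? blue_shirt_heights (fun y => y) with
  | none => false  -- unreachable under Pre_ (max of an empty list raises in Python)
  | some m_blue =>
    match PySem.List.max? red_shirt_heights (fun y => y) with
    | none => false  -- unreachable under Pre_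
    | some m_red => m_blue != m_red

-- ===== PRECONDITION & SPEC =====
-- Pre_ excludes exactly the inputs on which Python A raises: max([]) is a ValueError
-- (B raises there too).
def Pre_class_photos2 (red_shirt_heights : List Int) (blue_shirt_heights : List Int) : Prop :=
  red_shirt_heights ≠ [] ∧ blue_shirt_heights ≠ []
instance (red_shirt_heights : List Int) (blue_shirt_heights : List Int) : Decidable (Pre_class_photos2 red_shirt_heights blue_shirt_heights) := by unfold Pre_class_photos2; infer_instance
def pvWitness_class_photos2 : List Int × List Int := ([5, 8, 1], [6, 9, 2])

def Spec_class_photos2 (red_shirt_heights : List Int) (blue_shirt_heights : List Int) (out : Bool) : Prop := out = class_photos2_alt red_shirt_heights blue_shirt_heights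
instance (red_shirt_heights : List Int) (blue_shirt_heights : List Int) (out : Bool) : Decidable (Spec_class_photos2 red_shirt_heights blue_shirt_heights out) := by unfold Spec_class_photos2; infer_instance

-- ===== CLAIM (what is proved, stated in full; the proofs are below) =====
def Claim_equal_class_photos2 : Prop := ∀ (red_shirt_heights : List Int) (blue_shirt_heights : List Int), Dom_class_photos2 red_shirt_heights blue_shirt_heights → Pre_class_photos2 red_shirt_heights blue_shirt_heights → Spec_class_photos2 red_shirt_heights blue_shirt_heights (class_photos2 red_shirt_heights blue_shirt_heights)

-- ===== LEMMAS AND PROOFS =====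

-- A fold whose step keeps `none` at `none` stays at `none`.
theorem foldl_stay_none {α : Type} (f : Option Bool → α → Option Bool)
    (h : ∀ a, f none a = none) : ∀ l : List α, l.foldl f none = none := by
  intro l
  induction l with
  | nil => rfl
  | cons a t ih => simpa [List.foldl, h a] using ih

theorem class_photos2_spec : Claim_equal_class_photos2 := by
  intro red blue _ hpre
  obtain ⟨hr, hb⟩ := hpre
  unfold Spec_class_photos2 class_photos2 class_photos2_alt
  cases hmb : PySem.List.max? blue (fun y => y) with
  | none => rfl
  | some mb =>
    cases hmr : PySem.List.max? red (fun y => y) with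
    | none => rfl
    | some mr =>
      simp only
      by_cases heq : mb = mr
      · simp [heq]
      · simp only [if_neg heq]
        have hstep : ∀ (a : Nat),
            class_photos2_step red blue (max mb mr) none a = none := by
          intro a
          unfold class_photos2_step
          simp only [hmb, hmr, Option.getD_some]
          have hp1 : ¬(max mb mr ∈ blue ∧ mb < mr) := by
            rintro ⟨hin, hlt⟩
            have hle : max mb mr ≤ mb := PySem.List.max?_isMax hmb _ hin
            exact heq (le_antisymm (le_of_lt hlt) (le_trans (le_max_right mb mr) hle))
          have hp2 : ¬(max mb mr ∈ red ∧ mr < mb) := by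
            rintro ⟨hin, hlt⟩
            have hle : max mb mr ≤ mr := PySem.List.max?_isMax hmr _ hin
            exact heq ((le_antisymm (le_of_lt hlt) (le_trans (le_max_left mb mr) hle)).symm)
          simp [hp1, hp2]
        have hloop := foldl_stay_none _ hstep (List.range blue.length)
        simp only [hloop, Option.getD_none]
        simp [bne, heq]

-- ===== VERDICT (by name: the statement is the Claim_ definition above) =====
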